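-- pv_equiv track=rewrite | github.com/Pr-jasouli/python-DatasetStream-automation | ChannelSynthesizer/src/parsers/VOO_parser.py | modify_row
-- ===== SOURCE A (Python) =====
-- VOO_info_codes = {
--     "VS": "VOOsport",
--     "w VS": "VOOsport World",
--     "Pa": "Bouquet Panorama",
--     "Ci": "Option Ciné Pass",
--     "Doc": "Be Bouquet Documentaires",
--     "Div": "Be Bouquet Divertissement",
--     "Co": "Be Cool",
--     "Enf": "Be Bouquet Enfant",
--     "Sp": "Be Bouquet Sport",
--     "Sel": "Be Bouquet Selection",
--     "Inf": "Option Infos",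
--     "Sen": "Option Sensation",
--     "Ch": "Option Charme",
--     "FF": "Family Fun",
--     "DM": "Discover More",
--     "CX": "Classé X",
--     "MX": "Man-X",
--     "B": "Bruxelles",
--     "G": "Comm. German",
--     "W": "Wallonie",
-- }
--
-- def is_section_name_in_row(words, section_names):
--     section_indices = []
--     for i in range(len(words)):
--         for section in section_names:
--             section_words = section.split()
--             if words[i:i + len(section_words)] == section_words:
--                 section_indices.append((i, i + len(section_words) - 1))
--     return section_indices
--
-- def modify_row(row, section_names):
--     words = row.split()
--     last_valid_index = -1
--     section_indices = is_section_name_in_row(words, section_names)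
--
--     for i, word in enumerate(words):
--         if word in VOO_info_codes:
--             last_valid_index = i
--
--     if last_valid_index != -1 and section_indices:
--         first_section_index = min(section_indices, key=lambda x: x[0])[0]
--         return " ".join(words[:last_valid_index + 1]), " ".join(words[first_section_index:])
--     else:
--         return row, ""
-- ===== SOURCE B (Python) =====
-- VOO_info_codes = {
--     "VS": "VOOsport",
--     "w VS": "VOOsport World",
--     "Pa": "Bouquet Panorama",
--     "Ci": "Option Ciné Pass",
--     "Doc": "Be Bouquet Documentaires",
--     "Div": "Be Bouquet Divertissement",
--     "Co": "Be Cool",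
--     "Enf": "Be Bouquet Enfant",
--     "Sp": "Be Bouquet Sport",
--     "Sel": "Be Bouquet Selection",
--     "Inf": "Option Infos",
--     "Sen": "Option Sensation",
--     "Ch": "Option Charme",
--     "FF": "Family Fun",
--     "DM": "Discover More",
--     "CX": "Classé X",
--     "MX": "Man-X",
--     "B": "Bruxelles",
--     "G": "Comm. German",
--     "W": "Wallonie",
-- }
--
-- def modify_row(row, section_names):
--     words = row.split()
--     # index the section word-sequences by their first word
--     by_first = {}
--     for section in section_names:
--         sw = section.split()
--         if sw:
--             by_first.setdefault(sw[0], []).append(sw)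
--     last_valid = -1
--     first_section = -1
--     for i, word in enumerate(words):
--         if word in VOO_info_codes:
--             last_valid = i
--         if first_section == -1:
--             for sw in by_first.get(word, []):
--                 if words[i:i + len(sw)] == sw:
--                     first_section = i
--                     break
--     if last_valid != -1 and first_section != -1:
--         return " ".join(words[:last_valid + 1]), " ".join(words[first_section:])
--     return row, ""
-- ===== Notes on version B (the rewrite author's own statement) =====
-- stated objective: alternative
-- what changed: Replaces A's separate all-positions-times-all-sections scan (which builds the full list of section hits and then min-reduces it) plus a second enumerate pass with a first-word dictionary built once over section_names and a single pass over the words that maintains last_valid and the first section hit directly.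
-- outside the precondition, e.g. on modify_row('B Zen', ['']): A returns ('B', 'B Zen'), B returns ('B Zen', '')
import Mathlib
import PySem

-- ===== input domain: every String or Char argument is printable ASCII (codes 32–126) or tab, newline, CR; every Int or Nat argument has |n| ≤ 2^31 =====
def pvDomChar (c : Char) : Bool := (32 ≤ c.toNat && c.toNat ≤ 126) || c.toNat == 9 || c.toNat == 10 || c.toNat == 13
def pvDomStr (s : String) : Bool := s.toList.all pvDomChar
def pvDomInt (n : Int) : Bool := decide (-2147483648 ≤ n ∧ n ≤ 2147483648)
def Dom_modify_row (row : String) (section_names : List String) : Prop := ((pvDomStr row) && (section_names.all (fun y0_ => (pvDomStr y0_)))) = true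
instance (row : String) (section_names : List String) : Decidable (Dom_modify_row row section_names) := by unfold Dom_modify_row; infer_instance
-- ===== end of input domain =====

-- B replaces A's two passes (a quadratic all-positions × all-sections index list plus a second
-- enumerate scan and a min) by a first-word dictionary over section_names and one pass over the words.


-- ===== PORT A =====
def VOO_info_codes : PySem.Dict String String := PySem.Dict.ofList
  [("VS", "VOOsport"), ("w VS", "VOOsport World"), ("Pa", "Bouquet Panorama"),
   ("Ci", "Option Ciné Pass"), ("Doc", "Be Bouquet Documentaires"),
   ("Div", "Be Bouquet Divertissement"), ("Co", "Be Cool"), ("Enf", "Be Bouquet Enfant"),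
   ("Sp", "Be Bouquet Sport"), ("Sel", "Be Bouquet Selection"), ("Inf", "Option Infos"),
   ("Sen", "Option Sensation"), ("Ch", "Option Charme"), ("FF", "Family Fun"),
   ("DM", "Discover More"), ("CX", "Classé X"), ("MX", "Man-X"), ("B", "Bruxelles"),
   ("G", "Comm. German"), ("W", "Wallonie")]

def is_section_name_in_row (words : List String) (section_names : List String) : List (Int × Int) :=
  (PySem.List.pyRange 0 (words.length : Int) 1).foldl (fun acc i =>
    section_names.foldl (fun acc2 sec =>
      let section_words := PySem.Str.split₀ sec
      if PySem.List.slice words (some i) (some (i + (section_words.length : Int))) = section_words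
      then acc2 ++ [(i, i + (section_words.length : Int) - 1)] else acc2) acc) []

def modify_row (row : String) (section_names : List String) : String × String :=
  let words := PySem.Str.split₀ row
  let section_indices := is_section_name_in_row words section_names
  let last_valid_index : Int :=
    (PySem.List.enumerate words 0).foldl
      (fun lv iw => if VOO_info_codes.contains iw.2 then iw.1 else lv) (-1)
  if last_valid_index ≠ -1 ∧ section_indices ≠ [] then
    let first_section_index := ((PySem.List.min? section_indices (fun x => x.1)).getD (0, 0)).1
    (PySem.Str.join " " (PySem.List.slice words none (some (last_valid_index + 1))),
     PySem.Str.join " " (PySem.List.slice words (some first_section_index) none))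
  else (row, "")

-- ===== PORT B =====
def pvByFirst (section_names : List String) : PySem.Dict String (List (List String)) :=
  section_names.foldl (fun d sec =>
    match PySem.Str.split₀ sec with
    | [] => d
    | w :: ws => d.insert w (d.getD w [] ++ [w :: ws])) PySem.Dict.empty

def modify_row_alt (row : String) (section_names : List String) : String × String :=
  let words := PySem.Str.split₀ row
  let by_first := pvByFirst section_names
  let st : Int × Int :=
    (PySem.List.enumerate words 0).foldl (fun (st : Int × Int) iw =>
      ((if VOO_info_codes.contains iw.2 then iw.1 else st.1),
       (if st.2 = -1 ∧ (by_first.getD iw.2 []).any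
             (fun sw => decide (PySem.List.slice words (some iw.1) (some (iw.1 + (sw.length : Int))) = sw))
        then iw.1 else st.2))) (-1, -1)
  if st.1 ≠ -1 ∧ st.2 ≠ -1 then
    (PySem.Str.join " " (PySem.List.slice words none (some (st.1 + 1))),
     PySem.Str.join " " (PySem.List.slice words (some st.2) none))
  else (row, "")

-- ===== PRECONDITION & SPEC =====
-- Pre_ excludes inputs where section_names contains an empty/whitespace-only entry AND the row holds a
-- VOO code word: there A's empty split sequence vacuously "matches" at every word position while B's
-- first-word index naturally finds no section — a degenerate corner no caller would specify, on which
-- both values are defensible.  (Rows without a code word are kept: both programs return (row, "").)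
def Pre_modify_row (row : String) (section_names : List String) : Prop :=
  (section_names.all (fun s => !(PySem.Str.split₀ s).isEmpty)) = true ∨
  ((PySem.Str.split₀ row).all (fun w => !(VOO_info_codes.contains w))) = true
instance (row : String) (section_names : List String) : Decidable (Pre_modify_row row section_names) := by
  unfold Pre_modify_row; infer_instance

def pvWitness_modify_row : String × List String := ("B Zen 1", ["Zen"])

def Spec_modify_row (row : String) (section_names : List String) (out : String × String) : Prop :=
  out = modify_row_alt row section_names
instance (row : String) (section_names : List String) (out : String × String) : Decidable (Spec_modify_row row section_names out) := by
  unfold Spec_modify_row; infer_instance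

-- ===== CLAIM (what is proved, stated in full; the proofs are below) =====
def Claim_equal_modify_row : Prop := ∀ (row : String) (section_names : List String),
  Dom_modify_row row section_names → Pre_modify_row row section_names →
  Spec_modify_row row section_names (modify_row row section_names)

-- ===== LEMMAS AND PROOFS =====


-- proof-only helpers: A's per-position hit test and the bucket a word keys into in B's index
def pvHit (words section_names : List String) (k : Nat) : Bool :=
  section_names.any (fun sec =>
    decide (PySem.List.slice words (some (k : Int)) (some ((k : Int) + ((PySem.Str.split₀ sec).length : Int))) = PySem.Str.split₀ sec))

def pvBucket (w : String) (section_names : List String) : List (List String) :=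
  section_names.filterMap (fun sec =>
    match PySem.Str.split₀ sec with
    | [] => none
    | h :: t => if h == w then some (h :: t) else none)

theorem pv_byFirst_foldl (l : List String) (d : PySem.Dict String (List (List String))) (w : String) :
    (l.foldl (fun d sec =>
      match PySem.Str.split₀ sec with
      | [] => d
      | w' :: ws => d.insert w' (d.getD w' [] ++ [w' :: ws])) d).getD w []
    = d.getD w [] ++ pvBucket w l := by
  induction l generalizing d with
  | nil => simp [pvBucket]
  | cons sec t ih =>
    simp only [List.foldl_cons]
    cases hs : PySem.Str.split₀ sec with
    | nil => simp [pvBucket, hs, ih]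
    | cons h ts =>
      rw [ih]
      by_cases hw : h = w
      · subst hw
        simp [pvBucket, hs]
      · simp [pvBucket, hs, PySem.Dict.getD_insert, hw, Ne.symm hw]

theorem pv_byFirst_getD (sections : List String) (w : String) :
    (pvByFirst sections).getD w [] = pvBucket w sections := by
  unfold pvByFirst
  rw [pv_byFirst_foldl]
  simp [PySem.Dict.getD, PySem.Dict.get?, PySem.Dict.empty]

theorem pv_hit_eq (words sections : List String)
    (hpre : ∀ s ∈ sections, PySem.Str.split₀ s ≠ []) (k : Nat) (hk : k < words.length) :
    (((pvByFirst sections).getD (words.getD k "") []).any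
        (fun sw => decide (PySem.List.slice words (some (k : Int)) (some ((k : Int) + (sw.length : Int))) = sw)))
      = pvHit words sections k := by
  rw [pv_byFirst_getD]
  apply Bool.eq_iff_iff.mpr
  simp only [pvHit, List.any_eq_true, decide_eq_true_eq]
  constructor
  · rintro ⟨sw, hmem, hslice⟩
    rw [pvBucket, List.mem_filterMap] at hmem
    obtain ⟨sec, hsec, heq⟩ := hmem
    cases hs : PySem.Str.split₀ sec with
    | nil => rw [hs] at heq; simp at heq
    | cons h ts =>
      rw [hs] at heq
      simp only at heq
      split_ifs at heq with hww
      · obtain rfl : (h :: ts) = sw := by simpa using heq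
        exact ⟨sec, hsec, by rw [hs]; exact hslice⟩
  · rintro ⟨sec, hsec, hslice⟩
    obtain ⟨h, ts, hs⟩ : ∃ h ts, PySem.Str.split₀ sec = h :: ts := by
      cases hsp : PySem.Str.split₀ sec with
      | nil => exact absurd hsp (hpre sec hsec)
      | cons a b => exact ⟨a, b, rfl⟩
    rw [hs] at hslice
    have hhead : h = words.getD k "" := by
      have h1 : PySem.List.slice words (some (k : Int)) (some ((k : Int) + (((h :: ts).length : Nat) : Int))) = List.take (h :: ts).length (List.drop k words) :=
        PySem.List.slice_natCast_add words k (h :: ts).length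
      rw [h1] at hslice
      have h2 : (List.take (h :: ts).length (List.drop k words)).head? = some h := by
        rw [hslice]; rfl
      rw [List.head?_take] at h2
      simp only [List.head?_drop] at h2
      have h3 : words[k]? = some h := by
        by_cases hz : (h :: ts).length = 0
        · simp at hz
        · simpa [hz] using h2
      rw [List.getElem?_eq_getElem hk] at h3
      rw [List.getD_eq_getElem words "" hk]
      exact (Option.some.inj h3).symm
    refine ⟨h :: ts, ?_, ?_⟩
    · rw [pvBucket, List.mem_filterMap]
      exact ⟨sec, hsec, by rw [hs]; simp [hhead]⟩
    · exact hslice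

theorem pv_foldl_pair {α : Type} (l : List α) (f : Int → α → Int) (g : Int → α → Int) (a b : Int) :
    l.foldl (fun st p => (f st.1 p, g st.2 p)) (a, b) = (l.foldl f a, l.foldl g b) := by
  induction l generalizing a b with
  | nil => rfl
  | cons x t ih => simpa using ih (f a x) (g b x)

theorem pv_foldl_stuck (l : List (Int × String)) (q : Int × String → Prop) [DecidablePred q]
    (c : Int) (h : c ≠ -1) :
    l.foldl (fun fs p => if fs = -1 ∧ q p then p.1 else fs) c = c := by
  induction l with
  | nil => rfl
  | cons x t ih =>
    simp only [List.foldl_cons]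
    rw [if_neg (by simp [h])]
    exact ih

theorem pv_foldl_first (l : List (Int × String)) (q : Int × String → Prop) [DecidablePred q]
    (h : ∀ p ∈ l, p.1 ≠ -1) :
    l.foldl (fun fs p => if fs = -1 ∧ q p then p.1 else fs) (-1) =
      (match l.find? (fun p => decide (q p)) with
       | none => -1
       | some p => p.1) := by
  induction l with
  | nil => rfl
  | cons x t ih =>
    simp only [List.foldl_cons, List.find?_cons, true_and]
    by_cases hq : q x
    · rw [if_pos hq, pv_foldl_stuck t q x.1 (h x (by simp))]
      simp [hq]
    · rw [if_neg hq, ih (fun p hp => h p (by simp [hp]))]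
      simp [hq]

theorem pv_enum_eq (words : List String) :
    PySem.List.enumerate words 0 = (List.range words.length).map (fun (k : Nat) => ((k : Int), words.getD k "")) := by
  apply List.ext_getElem
  · simp
  · intro i h1 h2
    have hi : i < words.length := by simpa using h1
    simp [PySem.List.getElem_enumerate, List.getD, List.getElem?_eq_getElem hi]

theorem pv_find?_congr {α : Type} {l : List α} {p q : α → Bool} (h : ∀ a ∈ l, p a = q a) :
    l.find? p = l.find? q := by
  induction l with
  | nil => rfl
  | cons x t ih =>
    rw [List.find?_cons, List.find?_cons, h x (by simp)]
    cases hq : q x with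
    | true => rfl
    | false => exact ih (fun a ha => h a (by simp [ha]))

theorem pv_indices_eq (words sections : List String) :
    is_section_name_in_row words sections =
      (List.range words.length).flatMap (fun (k : Nat) =>
        (sections.filter (fun sec =>
           decide (PySem.List.slice words (some (k : Int)) (some ((k : Int) + ((PySem.Str.split₀ sec).length : Int))) = PySem.Str.split₀ sec))).map
          (fun sec => ((k : Int), (k : Int) + ((PySem.Str.split₀ sec).length : Int) - 1))) := by
  unfold is_section_name_in_row
  simp only [PySem.List.foldl_append_ite, PySem.List.foldl_append_eq_flatMap,
    List.nil_append, PySem.List.pyRange_one, List.flatMap_map]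
  simp

theorem pv_indices_nil (words sections : List String)
    (hfind : (List.range words.length).find? (pvHit words sections) = none) :
    is_section_name_in_row words sections = [] := by
  rw [pv_indices_eq]
  rw [List.find?_eq_none] at hfind
  apply List.flatMap_eq_nil_iff.mpr
  intro k hk
  have hhit := hfind k hk
  simp only [pvHit, Bool.not_eq_true, List.any_eq_false, decide_eq_true_eq] at hhit
  have : sections.filter (fun sec =>
      decide (PySem.List.slice words (some (k : Int)) (some ((k : Int) + ((PySem.Str.split₀ sec).length : Int))) = PySem.Str.split₀ sec)) = [] := by
    rw [List.filter_eq_nil_iff]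
    intro sec hsec
    simpa using hhit sec hsec
  rw [this, List.map_nil]

theorem pv_min?_head (x : Int × Int) (t : List (Int × Int)) (h : ∀ y ∈ t, x.1 ≤ y.1) :
    PySem.List.min? (x :: t) (fun p => p.1) = some x := by
  induction t with
  | nil => rfl
  | cons y u ih =>
    have hy : ¬ (y.1 < x.1) := not_lt.mpr (h y (by simp))
    unfold PySem.List.min? at ih ⊢
    simp only [List.foldl_cons, hy, if_false] at ih ⊢
    exact ih (fun z hz => h z (by simp [hz]))

theorem pv_first_section (words sections : List String) (k0 : Nat)
    (hfind : (List.range words.length).find? (pvHit words sections) = some k0) :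
    is_section_name_in_row words sections ≠ [] ∧
    ((PySem.List.min? (is_section_name_in_row words sections) (fun x => x.1)).getD (0, 0)).1 = (k0 : Int) := by
  rw [List.find?_eq_some_iff_getElem] at hfind
  obtain ⟨hk0, i, hi, hik, hprev⟩ := hfind
  have hieq : i = k0 := by simpa using hik
  subst hieq
  have hilt : i < words.length := by simpa using hi
  set n := words.length with hn
  set g : Nat → List (Int × Int) := fun (k : Nat) =>
    (sections.filter (fun sec =>
       decide (PySem.List.slice words (some (k : Int)) (some ((k : Int) + ((PySem.Str.split₀ sec).length : Int))) = PySem.Str.split₀ sec))).map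
      (fun sec => ((k : Int), (k : Int) + ((PySem.Str.split₀ sec).length : Int) - 1)) with hg
  have hgfst : ∀ k y, y ∈ g k → y.1 = (k : Int) := by
    intro k y hy
    rw [hg] at hy
    obtain ⟨sec, _, rfl⟩ := List.mem_map.mp hy
    rfl
  have hsplitrange : List.range n = List.range i ++ (i :: List.map (fun j => i + Nat.succ j) (List.range (n - i - 1))) := by
    have h1 : n = i + (n - i) := by omega
    have h2 : n - i = (n - i - 1) + 1 := by omega
    calc List.range n = List.range (i + (n - i)) := by rw [← h1]
      _ = List.range i ++ List.map (fun x => i + x) (List.range (n - i)) := List.range_add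
      _ = List.range i ++ List.map (fun x => i + x) (0 :: List.map Nat.succ (List.range (n - i - 1))) := by
            rw [h2, List.range_succ_eq_map]; simp
      _ = List.range i ++ (i :: List.map (fun j => i + Nat.succ j) (List.range (n - i - 1))) := by
            simp [List.map_map, Function.comp_def]
  have hgi_ne : g i ≠ [] := by
    rw [hg]
    simp only [ne_eq, List.map_eq_nil_iff, List.filter_eq_nil_iff, not_forall]
    simp only [pvHit, List.any_eq_true, decide_eq_true_eq] at hk0
    obtain ⟨sec, hsec, hsl⟩ := hk0
    exact ⟨sec, hsec, by simpa using hsl⟩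
  have hind : is_section_name_in_row words sections =
      (List.range i).flatMap g ++ (g i ++ (List.map (fun j => i + Nat.succ j) (List.range (n - i - 1))).flatMap g) := by
    rw [pv_indices_eq, ← hg, ← hn, hsplitrange, List.flatMap_append, List.flatMap_cons]
  have hpre_nil : (List.range i).flatMap g = [] := by
    apply List.flatMap_eq_nil_iff.mpr
    intro k hk
    have hk' : k < i := List.mem_range.mp hk
    have hhit := hprev k hk'
    simp only [List.getElem_range, Bool.not_eq_true'] at hhit
    rw [hg]
    simp only [List.map_eq_nil_iff, List.filter_eq_nil_iff]
    intro sec hsec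
    simp only [pvHit, List.any_eq_false, decide_eq_true_eq] at hhit
    simpa using hhit sec hsec
  obtain ⟨x, t', hgi⟩ := List.exists_cons_of_ne_nil hgi_ne
  have hx1 : x.1 = (i : Int) := hgfst i x (by rw [hgi]; simp)
  have hfull : is_section_name_in_row words sections =
      x :: (t' ++ (List.map (fun j => i + Nat.succ j) (List.range (n - i - 1))).flatMap g) := by
    rw [hind, hpre_nil, List.nil_append, hgi, List.cons_append]
  constructor
  · rw [hfull]; exact List.cons_ne_nil _ _
  · rw [hfull, pv_min?_head, Option.getD_some, hx1]
    intro y hy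
    rcases List.mem_append.mp hy with hyt | hyr
    · have : y.1 = (i : Int) := hgfst i y (by rw [hgi]; simp [hyt])
      rw [hx1, this]
    · obtain ⟨m, hm, hym⟩ := List.mem_flatMap.mp hyr
      obtain ⟨j, _, rfl⟩ := List.mem_map.mp hm
      have : y.1 = ((i + Nat.succ j : Nat) : Int) := hgfst _ y hym
      rw [hx1, this]
      push_cast
      omega

-- ===== VERDICT (by name: the statement is the Claim_ definition above) =====
theorem pv_lv_const (l : List (Int × String)) (c : Int)
    (h : ∀ p ∈ l, VOO_info_codes.contains p.2 = false) :
    l.foldl (fun lv iw => if VOO_info_codes.contains iw.2 then iw.1 else lv) c = c := by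
  induction l generalizing c with
  | nil => rfl
  | cons x t ih =>
    rw [List.foldl_cons, if_neg (by simp [h x (by simp)]), ih c (fun p hp => h p (by simp [hp]))]

theorem modify_row_spec : Claim_equal_modify_row := by
  intro row sections _ hpre
  rcases hpre with hpre | hnocode
  case inr =>
    -- no word of the row is a VOO code: last_valid stays -1 on both sides
    show modify_row row sections = modify_row_alt row sections
    unfold modify_row modify_row_alt
    simp only []
    set words := PySem.Str.split₀ row with hwords
    rw [pv_foldl_pair (PySem.List.enumerate words 0)
        (fun lv iw => if VOO_info_codes.contains iw.2 then iw.1 else lv)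
        (fun fs iw => if fs = -1 ∧ ((pvByFirst sections).getD iw.2 []).any
              (fun sw => decide (PySem.List.slice words (some iw.1) (some (iw.1 + (sw.length : Int))) = sw)) = true
          then iw.1 else fs) (-1) (-1)]
    rw [pv_lv_const _ _ (by
      intro p hp
      rw [pv_enum_eq] at hp
      obtain ⟨k, hk, rfl⟩ := List.mem_map.mp hp
      by_cases hkl : k < words.length
      · have := List.all_eq_true.mp hnocode (words.getD k "") (by
          rw [List.getD_eq_getElem words "" hkl]; exact List.getElem_mem hkl)
        simpa using this
      · exact absurd (List.mem_range.mp hk) hkl)]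
    simp
  case inl =>
  have hpre' : ∀ s ∈ sections, PySem.Str.split₀ s ≠ [] := by
    intro s hs
    have := List.all_eq_true.mp hpre s hs
    simpa using this
  show modify_row row sections = modify_row_alt row sections
  unfold modify_row modify_row_alt
  simp only []
  set words := PySem.Str.split₀ row with hwords
  rw [pv_foldl_pair (PySem.List.enumerate words 0)
      (fun lv iw => if VOO_info_codes.contains iw.2 then iw.1 else lv)
      (fun fs iw => if fs = -1 ∧ ((pvByFirst sections).getD iw.2 []).any
            (fun sw => decide (PySem.List.slice words (some iw.1) (some (iw.1 + (sw.length : Int))) = sw)) = true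
        then iw.1 else fs) (-1) (-1)]
  set lv : Int := (PySem.List.enumerate words 0).foldl
      (fun lv iw => if VOO_info_codes.contains iw.2 then iw.1 else lv) (-1) with hlv
  rw [pv_foldl_first _ _ (by
    intro p hp
    rw [pv_enum_eq] at hp
    obtain ⟨k, hk, rfl⟩ := List.mem_map.mp hp
    show (k : Int) ≠ -1
    omega)]
  rw [pv_enum_eq, List.find?_map]
  rw [pv_find?_congr (q := pvHit words sections) (by
    intro k hk
    have hk' : k < words.length := List.mem_range.mp hk
    simp only [Function.comp_apply]
    rw [Bool.decide_coe]
    exact pv_hit_eq words sections hpre' k hk')]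
  cases hr : (List.range words.length).find? (pvHit words sections) with
  | none =>
    have hnil := pv_indices_nil words sections hr
    simp [hnil]
  | some k0 =>
    obtain ⟨hne, hmin⟩ := pv_first_section words sections k0 hr
    simp only [Option.map_some]
    by_cases hlv1 : lv = -1
    · simp [hlv1, hne]
    · have hk0 : ((k0 : Int)) ≠ -1 := by omega
      simp only [hne, hlv1, hk0, ne_eq, not_false_iff, and_self, if_true, hmin]
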